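-- pv_equiv track=rewrite | github.com/Zysishuiyears/Graph-Theory-B-coloring-of-Cartesian-products | src/legacy/code/general_product_search_20260315_pre_split.py | canonical_relabel_key
-- ===== SOURCE A (Python) =====
-- from typing import Dict, List, Optional, Sequence, Set, Tuple
--
-- def canonical_relabel_key(colors: List[int]) -> Tuple[int, ...]:
--     mp: Dict[int, int] = {}
--     nxt = 0
--     out = []
--     for x in colors:
--         if x not in mp:
--             mp[x] = nxt
--             nxt += 1
--         out.append(mp[x])
--     return tuple(out)
-- ===== SOURCE B (Python) =====
-- def canonical_relabel_key(colors):
--     # coordinate compression: label = rank of the value's first-occurrence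
--     # position among all first-occurrence positions (ranks from sorting)
--     n = len(colors)
--     pos = {x: n - 1 - i for i, x in enumerate(reversed(colors))}
--     rank = {p: r for r, p in enumerate(sorted(pos.values()))}
--     return tuple(rank[pos[x]] for x in colors)
-- ===== Notes on version B (the rewrite author's own statement) =====
-- stated objective: alternative
-- what changed: Replaces A's running-counter dict loop by coordinate compression: a reversed-pass dict comprehension records each value's first-occurrence position, those positions are sorted and ranked, and each element's label is the rank of its first-occurrence position.
import Mathlib
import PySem

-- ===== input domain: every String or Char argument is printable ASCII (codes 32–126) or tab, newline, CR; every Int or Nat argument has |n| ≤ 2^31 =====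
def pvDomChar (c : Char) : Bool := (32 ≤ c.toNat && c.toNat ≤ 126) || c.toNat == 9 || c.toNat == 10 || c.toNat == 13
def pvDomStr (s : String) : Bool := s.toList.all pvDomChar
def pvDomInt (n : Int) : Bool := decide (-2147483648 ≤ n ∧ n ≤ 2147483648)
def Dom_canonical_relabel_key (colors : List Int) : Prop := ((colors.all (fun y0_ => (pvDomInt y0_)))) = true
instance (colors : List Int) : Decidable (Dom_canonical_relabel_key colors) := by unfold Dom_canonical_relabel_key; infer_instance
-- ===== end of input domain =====

-- B relabels by coordinate compression — record each value's first-occurrence position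
-- (a reversed-pass overwrite dict), sort those positions and rank them — instead of A's
-- running-counter loop; same result by a different route (objective: alternative).
-- Python A returns a tuple, B a tuple; both are List Int here per the type convention.

-- ===== PORT A =====
-- one iteration of A's loop body: state (mp, nxt, out)
def pvStepA (st : PySem.Dict Int Int × Int × List Int) (x : Int) :
    PySem.Dict Int Int × Int × List Int :=
  let mp := st.1
  let nxt := st.2.1
  let out := st.2.2
  if !mp.contains x then
    let mp := mp.insert x nxt
    (mp, nxt + 1, out ++ [mp.getD x 0])
  else
    (mp, nxt, out ++ [mp.getD x 0])

def canonical_relabel_key (colors : List Int) : List Int :=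
  (colors.foldl pvStepA (PySem.Dict.empty, 0, [])).2.2

-- ===== PORT B =====
def canonical_relabel_key_alt (colors : List Int) : List Int :=
  let n : Int := colors.length
  -- pos = {x: n - 1 - i for i, x in enumerate(reversed(colors))}
  let pos := (PySem.List.enumerate colors.reverse 0).foldl
      (fun (d : PySem.Dict Int Int) p => d.insert p.2 (n - 1 - p.1)) PySem.Dict.empty
  -- rank = {p: r for r, p in enumerate(sorted(pos.values()))}
  let rank := (PySem.List.enumerate (PySem.List.sorted pos.values (fun x => x) false) 0).foldl
      (fun (d : PySem.Dict Int Int) p => d.insert p.2 p.1) PySem.Dict.empty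
  -- tuple(rank[pos[x]] for x in colors); both keys are always present
  colors.map (fun x => rank.getD (pos.getD x 0) 0)

-- ===== PRECONDITION & SPEC =====
def Spec_canonical_relabel_key (colors : List Int) (out : List Int) : Prop := out = canonical_relabel_key_alt colors
instance (colors : List Int) (out : List Int) : Decidable (Spec_canonical_relabel_key colors out) := by unfold Spec_canonical_relabel_key; infer_instance

-- ===== CLAIM (what is proved, stated in full; the proofs are below) =====
def Claim_equal_canonical_relabel_key : Prop := ∀ (colors : List Int), Dom_canonical_relabel_key colors → Spec_canonical_relabel_key colors (canonical_relabel_key colors)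

-- ===== LEMMAS AND PROOFS =====

-- reference: relabel `rest` given the distinct values already `seen`, in order
def pvRef (seen rest : List Int) : List Int :=
  match rest with
  | [] => []
  | x :: r =>
    if x ∈ seen then ((seen.idxOf x : Nat) : Int) :: pvRef seen r
    else ((seen.length : Nat) : Int) :: pvRef (seen ++ [x]) r

-- a fold of inserts over an enumerated NODUP list looks up the index
lemma pv_getD_enum_fold (l : List Int) : ∀ (s : Int) (d : PySem.Dict Int Int) (x : Int),
    l.Nodup →
    ((PySem.List.enumerate l s).foldl
        (fun (d : PySem.Dict Int Int) p => d.insert p.2 p.1) d).getD x 0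
      = if x ∈ l then s + (l.idxOf x : Int) else d.getD x 0 := by
  induction l with
  | nil => intro s d x _; simp [PySem.List.enumerate]
  | cons a t ih =>
    intro s d x hnd
    rw [PySem.List.enumerate_cons]
    simp only [List.foldl_cons]
    rw [ih (s+1) _ x hnd.of_cons]
    by_cases hx : x = a
    · subst hx
      have hxt : x ∉ t := (List.nodup_cons.mp hnd).1
      simp [hxt, List.idxOf_cons_self]
    · by_cases hm : x ∈ t
      · simp only [hm, if_true, List.mem_cons, hx, false_or, if_true]
        rw [List.idxOf_cons_ne _ (by simpa using (Ne.symm hx))]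
        push_cast
        ring
      · simp [hm, hx, PySem.Dict.getD_insert]

-- pvRef in terms of the final first-occurrence order
lemma pv_ref_eq_map (rest : List Int) : ∀ (seen : List Int), seen.Nodup →
    pvRef seen rest
      = rest.map (fun x => ((PySem.Set.update seen rest).idxOf x : Int)) := by
  induction rest with
  | nil => intro seen _; simp [pvRef]
  | cons x r ih =>
    intro seen hnd
    by_cases hx : x ∈ seen
    · have hupd : PySem.Set.update seen (x :: r) = PySem.Set.update seen r := by
        rw [PySem.Set.update_cons, PySem.Set.add_of_mem hx]
      obtain ⟨t, ht⟩ : ∃ t, PySem.Set.update seen r = seen ++ t :=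
        ⟨_, PySem.Set.update_eq_append_filter seen r⟩
      simp only [pvRef, hx, if_true, List.map_cons, hupd]
      congr 1
      · rw [ht, List.idxOf_append_of_mem hx]
      · exact ih seen hnd
    · have hupd : PySem.Set.update seen (x :: r) = PySem.Set.update (seen ++ [x]) r := by
        rw [PySem.Set.update_cons, PySem.Set.add_of_not_mem hx]
      obtain ⟨t, ht⟩ : ∃ t, PySem.Set.update (seen ++ [x]) r = (seen ++ [x]) ++ t :=
        ⟨_, PySem.Set.update_eq_append_filter (seen ++ [x]) r⟩
      have hnd' : (seen ++ [x]).Nodup := by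
        refine hnd.append (List.nodup_singleton x) ?_
        intro a ha hb
        exact hx ((List.mem_singleton.mp hb) ▸ ha)
      simp only [pvRef, hx, if_false, List.map_cons, hupd]
      congr 1
      · rw [ht, List.idxOf_append_of_mem (by simp : x ∈ seen ++ [x]),
            List.idxOf_append_of_notMem hx]
        simp
      · exact ih (seen ++ [x]) hnd'

-- A's loop, generalized over its state
lemma pv_A_loop (rest : List Int) : ∀ (seen out : List Int) (mp : PySem.Dict Int Int),
    seen.Nodup →
    (∀ v : Int, mp.get? v = if v ∈ seen then some ((seen.idxOf v : Nat) : Int) else none) →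
    (rest.foldl pvStepA (mp, (seen.length : Int), out)).2.2 = out ++ pvRef seen rest := by
  induction rest with
  | nil => intro seen out mp _ _; simp [pvRef]
  | cons x r ih =>
    intro seen out mp hnd hch
    have hcont : mp.contains x = decide (x ∈ seen) := by
      rw [PySem.Dict.contains_eq_isSome_get?, hch x]
      by_cases hx : x ∈ seen <;> simp [hx]
    by_cases hx : x ∈ seen
    · have hstep : pvStepA (mp, (seen.length : Int), out) x
          = (mp, (seen.length : Int), out ++ [((seen.idxOf x : Nat) : Int)]) := by
        simp [pvStepA, hcont, hx, PySem.Dict.getD_eq_get?_getD, hch x]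
      simp only [List.foldl_cons, hstep]
      rw [ih seen _ mp hnd hch]
      simp [pvRef, hx]
    · have hstep : pvStepA (mp, (seen.length : Int), out) x
          = (mp.insert x (seen.length : Int), (seen.length : Int) + 1,
              out ++ [((seen.length : Nat) : Int)]) := by
        simp [pvStepA, hcont, hx]
      have hch' : ∀ v : Int, (mp.insert x (seen.length : Int)).get? v
          = if v ∈ seen ++ [x] then some (((seen ++ [x]).idxOf v : Nat) : Int) else none := by
        intro v
        rw [PySem.Dict.get?_insert, hch v]
        by_cases hv : v = x
        · subst hv
          simp [List.idxOf_append_of_notMem hx]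
        · by_cases hm : v ∈ seen
          · simp [hv, hm, List.idxOf_append_of_mem hm]
          · simp [hv, hm]
      have hnd' : (seen ++ [x]).Nodup := by
        refine hnd.append (List.nodup_singleton x) ?_
        intro a ha hb
        exact hx ((List.mem_singleton.mp hb) ▸ ha)
      have hlen : ((seen ++ [x]).length : Int) = (seen.length : Int) + 1 := by
        simp
      simp only [List.foldl_cons, hstep]
      rw [← hlen, ih (seen ++ [x]) _ _ hnd' hch']
      simp [pvRef, hx]

-- A computes the first-occurrence relabelling
lemma pv_A_eq_map (colors : List Int) :
    canonical_relabel_key colors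
      = colors.map (fun x => ((PySem.List.dedup colors).idxOf x : Int)) := by
  unfold canonical_relabel_key
  have := pv_A_loop colors [] [] PySem.Dict.empty (by simp) (by
    intro v; simp [PySem.Dict.get?_empty])
  simp only [List.length_nil, Nat.cast_zero, List.nil_append] at this
  rw [this, pv_ref_eq_map colors [] (by simp)]
  rw [PySem.Set.update_nil_left]
  simp


-- B-SIDE LEMMAS (proof-only abbreviations of B's two dicts)
def pvPos (colors : List Int) : PySem.Dict Int Int :=
  (PySem.List.enumerate colors.reverse 0).foldl
    (fun (d : PySem.Dict Int Int) p => d.insert p.2 ((colors.length : Int) - 1 - p.1))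
    PySem.Dict.empty

def pvRank (colors : List Int) : PySem.Dict Int Int :=
  (PySem.List.enumerate (PySem.List.sorted (pvPos colors).values (fun x => x) false) 0).foldl
    (fun (d : PySem.Dict Int Int) p => d.insert p.2 p.1) PySem.Dict.empty

lemma pv_alt_unfold (colors : List Int) :
    canonical_relabel_key_alt colors
      = colors.map (fun x => (pvRank colors).getD ((pvPos colors).getD x 0) 0) := rfl

-- last write wins: a fold of inserts over an enumerated list (duplicate keys possible)
lemma pv_last_write (m : Int) (l : List Int) :
    ∀ (d : PySem.Dict Int Int) (x : Int),
    ((PySem.List.enumerate l 0).foldl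
        (fun (d : PySem.Dict Int Int) p => d.insert p.2 (m - p.1)) d).getD x 0
      = if x ∈ l then m - ((l.length : Int) - 1 - (l.reverse.idxOf x : Int))
        else d.getD x 0 := by
  induction l using List.reverseRecOn with
  | nil => intro d x; simp [PySem.List.enumerate]
  | append_singleton t a ih =>
    intro d x
    rw [PySem.List.enumerate_append]
    simp only [List.foldl_append, PySem.List.enumerate_cons, PySem.List.enumerate_nil,
      List.foldl_cons, List.foldl_nil]
    rw [PySem.Dict.getD_insert]
    by_cases hx : x = a
    · subst hx
      have h0 : (t ++ [x]).reverse.idxOf x = 0 := by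
        simp [List.reverse_append, List.idxOf_cons_self]
      simp only [List.mem_append, List.mem_singleton, or_true, if_true, h0,
        List.length_append, List.length_singleton]
      push_cast
      ring
    · rw [if_neg hx, ih d x]
      by_cases hm : x ∈ t
      · have hrev : (t ++ [a]).reverse.idxOf x = t.reverse.idxOf x + 1 := by
          rw [List.reverse_append]
          simp only [List.reverse_cons, List.reverse_nil, List.nil_append,
            List.singleton_append]
          exact List.idxOf_cons_ne _ (fun h => hx h.symm)
        simp only [hm, if_true, List.mem_append, List.mem_singleton, hx, or_false, if_true,
          hrev, List.length_append, List.length_singleton]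
        push_cast
        ring_nf
      · simp [hm, hx]

-- the distinct values in first-occurrence order have strictly increasing first positions
lemma pv_dedup_idx_lt (l : List Int) :
    (PySem.List.dedup l).Pairwise (fun a b => l.idxOf a < l.idxOf b) := by
  induction l with
  | nil => simp [PySem.List.dedup]
  | cons c t ih =>
    rw [PySem.List.dedup_eq_ofList] at ih ⊢
    rw [PySem.Set.ofList_cons]
    have hsub : List.Sublist (PySem.Set.discard (PySem.Set.ofList t) c) (PySem.Set.ofList t) := by
      simp only [PySem.Set.discard]
      exact List.filter_sublist
    refine List.Pairwise.cons ?_ ?_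
    · intro b hb
      have hbc : b ≠ c := ((PySem.Set.mem_discard _ _ _).mp hb).2
      rw [List.idxOf_cons_self, List.idxOf_cons_ne _ (Ne.symm hbc)]
      omega
    · have hp : (PySem.Set.discard (PySem.Set.ofList t) c).Pairwise
          (fun a b => t.idxOf a < t.idxOf b) := ih.sublist hsub
      refine hp.imp_of_mem ?_
      intro a b ha hb hab
      have hac : a ≠ c := ((PySem.Set.mem_discard _ _ _).mp ha).2
      have hbc : b ≠ c := ((PySem.Set.mem_discard _ _ _).mp hb).2
      rw [List.idxOf_cons_ne _ (Ne.symm hac), List.idxOf_cons_ne _ (Ne.symm hbc)]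
      omega

-- idxOf through a map that is injective on the list
lemma pv_idxOf_map (f : Int → Int) (l : List Int) (x : Int)
    (hinj : ∀ a ∈ l, ∀ b ∈ l, f a = f b → a = b) (hx : x ∈ l) :
    (l.map f).idxOf (f x) = l.idxOf x := by
  induction l with
  | nil => cases hx
  | cons a t ih =>
    by_cases hxa : x = a
    · subst hxa; simp [List.idxOf_cons_self]
    · have hxt : x ∈ t := by
        rcases List.mem_cons.mp hx with h | h
        · exact absurd h hxa
        · exact h
      have hne : f x ≠ f a := fun h => hxa (hinj x hx a List.mem_cons_self h)
      rw [List.map_cons, List.idxOf_cons_ne _ (Ne.symm hne),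
          List.idxOf_cons_ne _ (Ne.symm hxa),
          ih (fun p hp q hq => hinj p (List.mem_cons_of_mem _ hp) q (List.mem_cons_of_mem _ hq)) hxt]

-- colors.idxOf (as an Int-valued map) is injective on members
lemma pv_idx_inj (colors : List Int) :
    ∀ a ∈ PySem.List.dedup colors, ∀ b ∈ PySem.List.dedup colors,
      ((colors.idxOf a : Nat) : Int) = ((colors.idxOf b : Nat) : Int) → a = b := by
  intro a ha b hb h
  rw [PySem.List.mem_dedup] at ha hb
  have ha' := List.idxOf_lt_length_of_mem ha
  have hb' := List.idxOf_lt_length_of_mem hb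
  have hn : colors.idxOf a = colors.idxOf b := by exact_mod_cast h
  have hg : colors[colors.idxOf a] = colors[colors.idxOf b] := by congr 1
  rwa [List.getElem_idxOf ha', List.getElem_idxOf hb'] at hg

-- pvPos looks up the first-occurrence index
lemma pv_pos_getD (colors : List Int) (x : Int) (hx : x ∈ colors) :
    (pvPos colors).getD x 0 = ((colors.idxOf x : Nat) : Int) := by
  unfold pvPos
  rw [pv_last_write ((colors.length : Int) - 1) colors.reverse PySem.Dict.empty x]
  have hxr : x ∈ colors.reverse := by simpa using hx
  rw [if_pos hxr]
  have hidx : colors.reverse.reverse.idxOf x = colors.idxOf x := by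
    rw [List.reverse_reverse]
  have hlt := List.idxOf_lt_length_of_mem hx
  rw [← hidx]
  simp only [List.length_reverse]
  omega

-- the sorted position list is the dedup order's first-index list
lemma pv_sorted_vals (colors : List Int) :
    PySem.List.sorted (pvPos colors).values (fun x => x) false
      = (PySem.List.dedup colors).map (fun v => ((colors.idxOf v : Nat) : Int)) := by
  have hkeys : (pvPos colors).keys = PySem.List.dedup colors.reverse := by
    unfold pvPos
    rw [PySem.Dict.keys_foldl_insert_key]
    rw [PySem.List.map_snd_enumerate]
    simp [PySem.Set.update_nil_left]
  have hnodk : (pvPos colors).keys.Nodup := by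
    rw [hkeys]; exact PySem.List.nodup_dedup _
  have hvals2 : (pvPos colors).values
      = (PySem.List.dedup colors.reverse).map (fun k => ((colors.idxOf k : Nat) : Int)) := by
    have hvals := PySem.Dict.values_eq_map_keys (pvPos colors) hnodk 0
    rw [hvals, hkeys]
    apply List.map_congr_left
    intro k hk
    have hkc : k ∈ colors := by
      rw [PySem.List.mem_dedup, List.mem_reverse] at hk
      exact hk
    exact pv_pos_getD colors k hkc
  have hperm : (PySem.List.dedup colors).Perm (PySem.List.dedup colors.reverse) := by
    rw [List.perm_ext_iff_of_nodup (PySem.List.nodup_dedup _) (PySem.List.nodup_dedup _)]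
    intro a
    rw [PySem.List.mem_dedup, PySem.List.mem_dedup, List.mem_reverse]
  have hpermv : ((PySem.List.dedup colors).map (fun v => ((colors.idxOf v : Nat) : Int))).Perm
      (pvPos colors).values := by
    rw [hvals2]
    exact hperm.map _
  have hpw : ((PySem.List.dedup colors).map (fun v => ((colors.idxOf v : Nat) : Int))).Pairwise
      (fun a b => (fun x : Int => x) a < (fun x : Int => x) b) := by
    refine List.Pairwise.map _ ?_ (pv_dedup_idx_lt colors)
    intro a b hab
    simpa using hab
  exact PySem.List.sorted_eq_of_perm_of_pairwise_lt _ _ _ hpermv hpw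

-- B computes the first-occurrence relabelling too
lemma pv_B_eq_map (colors : List Int) :
    canonical_relabel_key_alt colors
      = colors.map (fun x => ((PySem.List.dedup colors).idxOf x : Int)) := by
  rw [pv_alt_unfold]
  apply List.map_congr_left
  intro x hx
  have hxd : x ∈ PySem.List.dedup colors := (PySem.List.mem_dedup _ _).mpr hx
  have hys : ((PySem.List.dedup colors).map (fun v => ((colors.idxOf v : Nat) : Int))).Nodup := by
    have hpw := pv_dedup_idx_lt colors
    have : ((PySem.List.dedup colors).map (fun v => ((colors.idxOf v : Nat) : Int))).Pairwise (· ≠ ·) := by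
      refine List.Pairwise.map _ ?_ hpw
      intro a b hab h
      have : colors.idxOf a = colors.idxOf b := by exact_mod_cast h
      omega
    exact this
  unfold pvRank
  rw [pv_sorted_vals]
  rw [pv_getD_enum_fold _ 0 _ _ hys]
  rw [pv_pos_getD colors x hx]
  have hmem : ((colors.idxOf x : Nat) : Int)
      ∈ (PySem.List.dedup colors).map (fun v => ((colors.idxOf v : Nat) : Int)) :=
    List.mem_map_of_mem hxd
  rw [if_pos hmem]
  rw [pv_idxOf_map _ _ _ (pv_idx_inj colors) hxd]
  simp

-- ===== VERDICT (by name: the statement is the Claim_ definition above) =====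
theorem canonical_relabel_key_spec : Claim_equal_canonical_relabel_key := by
  intro colors _
  unfold Spec_canonical_relabel_key
  rw [pv_A_eq_map, pv_B_eq_map]
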